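-- pv_equiv track=rewrite | github.com/DongjinSun/Daebak | Daebak/employee/module.py | dinner_convert
-- ===== SOURCE A (Python) =====
-- def dinner_convert(dinner_l):
--     _l = [0,0,0,0,0,0,0,0,0,0,0,0,0,0,0,0]
--     for i,num in enumerate(dinner_l): # i: idx. num: value
--         if i ==0 and num:
--             _l[5] += num #스테이크
--             _l[-2]+= num # 와인한병
--         if i ==1 and num:
--             _l[5] += num # 스테이크
--             _l[6]+= num # 셀러드
--             _l[-3] += num # 와인한잔
--             _l[-5] += num # 커피한잔
--         if i ==2 and num:
--             _l[5] += num # 스테이크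
--             _l[8]+= num # 빵
--             _l[7]+= num # 베이컨
--             _l[6]+= num #에크스크램블
--         if i == 3 and num:
--             _l[5] += num # 스테이크 2개. # 수정.
--             _l[-6]+= num//2 # 바게트빵 4개. # 수정.
--             _l[-4] += num//2 # 커피 한포트
--             _l[-2] += num//2 # 와인한병
--             _l[-1] += num//2 # 샴페인 한병
--     return _l
-- ===== SOURCE B (Python) =====
-- def dinner_convert(dinner_l):
--     # closed form: only the first four counts matter; adding 0 is a no-op,
--     # so each output slot is a direct formula of (a, b, c, d).
--     a, b, c, d = (list(dinner_l) + [0, 0, 0, 0])[:4]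
--     h = d // 2
--     return [0, 0, 0, 0, 0,
--             a + b + c + d,   # steak
--             b + c,           # salad / scramble
--             c,               # bacon
--             c,               # bread
--             0,
--             h,               # baguette
--             b,               # coffee cup
--             h,               # coffee pot
--             b,               # wine glass
--             a + h,           # wine bottle
--             h]               # champagne
-- ===== Notes on version B (the rewrite author's own statement) =====
-- stated objective: simpler
-- what changed: Replaces A's loop over enumerate with index-branch chain by a loop-free closed form: pad the input to four counts (a,b,c,d) and return the 16-slot list built directly from per-slot arithmetic formulas (adding 0 is a no-op, so A's 'and num' guards are value-irrelevant); per element A evaluates four branches while B only copies, so the constant factor drops.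
import Mathlib
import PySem

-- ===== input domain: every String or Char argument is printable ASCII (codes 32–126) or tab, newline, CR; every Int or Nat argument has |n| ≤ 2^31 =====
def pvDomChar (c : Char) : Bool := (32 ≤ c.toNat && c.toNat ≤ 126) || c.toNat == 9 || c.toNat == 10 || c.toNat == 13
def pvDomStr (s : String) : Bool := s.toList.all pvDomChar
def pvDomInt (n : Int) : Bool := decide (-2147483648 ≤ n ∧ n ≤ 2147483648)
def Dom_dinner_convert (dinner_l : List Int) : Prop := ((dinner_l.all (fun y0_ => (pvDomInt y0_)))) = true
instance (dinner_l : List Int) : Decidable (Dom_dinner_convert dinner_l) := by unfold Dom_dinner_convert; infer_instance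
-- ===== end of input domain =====

-- B replaces A's loop-with-branch-chain by a loop-free closed form over the first four counts (objective: simpler).

-- ===== PORT A =====
-- _l[idx] += v with Python's negative-index resolution (every index A uses is in range for the 16-slot list)
def pvAddAt (l : List Int) (i : Int) (v : Int) : List Int :=
  let j := (if i < 0 then i + (l.length : Int) else i).toNat
  l.set j (l.getD j 0 + v)

-- the body of A's `for` loop, branch for branch
def pvStepA (l : List Int) (p : Int × Int) : List Int :=
  let i := p.1
  let num := p.2
  let l := if i = 0 ∧ num ≠ 0 then pvAddAt (pvAddAt l 5 num) (-2) num else l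
  let l := if i = 1 ∧ num ≠ 0 then
      pvAddAt (pvAddAt (pvAddAt (pvAddAt l 5 num) 6 num) (-3) num) (-5) num else l
  let l := if i = 2 ∧ num ≠ 0 then
      pvAddAt (pvAddAt (pvAddAt (pvAddAt l 5 num) 8 num) 7 num) 6 num else l
  let l := if i = 3 ∧ num ≠ 0 then
      pvAddAt (pvAddAt (pvAddAt (pvAddAt (pvAddAt l 5 num)
        (-6) (PySem.Int.floordiv num 2)) (-4) (PySem.Int.floordiv num 2))
        (-2) (PySem.Int.floordiv num 2)) (-1) (PySem.Int.floordiv num 2) else l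
  l

def dinner_convert (dinner_l : List Int) : List Int :=
  (PySem.List.enumerate dinner_l).foldl pvStepA (List.replicate 16 0)

-- ===== PORT B =====
def dinner_convert_alt (dinner_l : List Int) : List Int :=
  match (dinner_l ++ [0, 0, 0, 0]).take 4 with
  | [a, b, c, d] =>
    let h := PySem.Int.floordiv d 2
    [0, 0, 0, 0, 0, a + b + c + d, b + c, c, c, 0, h, b, h, b, a + h, h]
  | _ => []  -- unreachable: the slice always has exactly four elements

-- ===== PRECONDITION & SPEC =====
def Spec_dinner_convert (dinner_l : List Int) (out : List Int) : Prop := out = dinner_convert_alt dinner_l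
instance (dinner_l : List Int) (out : List Int) : Decidable (Spec_dinner_convert dinner_l out) := by unfold Spec_dinner_convert; infer_instance

-- ===== CLAIM =====
def Claim_equal_dinner_convert : Prop := ∀ (dinner_l : List Int), Dom_dinner_convert dinner_l → Spec_dinner_convert dinner_l (dinner_convert dinner_l)

-- ===== LEMMAS AND PROOFS =====

theorem pvStep0 (a : Int) :
    pvStepA (List.replicate 16 0) (0, a) =
      [0, 0, 0, 0, 0, a, 0, 0, 0, 0, 0, 0, 0, 0, a, 0] := by
  by_cases ha : a = 0 <;> simp [pvStepA, pvAddAt, ha, List.replicate, List.set, List.getD]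

theorem pvStep1 (a b : Int) :
    pvStepA [0, 0, 0, 0, 0, a, 0, 0, 0, 0, 0, 0, 0, 0, a, 0] (1, b) =
      [0, 0, 0, 0, 0, a + b, b, 0, 0, 0, 0, b, 0, b, a, 0] := by
  by_cases hb : b = 0 <;> simp [pvStepA, pvAddAt, hb, List.set, List.getD]

theorem pvStep2 (a b c : Int) :
    pvStepA [0, 0, 0, 0, 0, a + b, b, 0, 0, 0, 0, b, 0, b, a, 0] (2, c) =
      [0, 0, 0, 0, 0, a + b + c, b + c, c, c, 0, 0, b, 0, b, a, 0] := by
  by_cases hc : c = 0 <;> simp [pvStepA, pvAddAt, hc, List.set, List.getD]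

theorem pvStep3 (a b c d : Int) :
    pvStepA [0, 0, 0, 0, 0, a + b + c, b + c, c, c, 0, 0, b, 0, b, a, 0] (3, d) =
      [0, 0, 0, 0, 0, a + b + c + d, b + c, c, c, 0,
        PySem.Int.floordiv d 2, b, PySem.Int.floordiv d 2, b,
        a + PySem.Int.floordiv d 2, PySem.Int.floordiv d 2] := by
  by_cases hd : d = 0 <;> simp [pvStepA, pvAddAt, hd, List.set, List.getD]

theorem pvStepA_high (l : List Int) (p : Int × Int) (h : 4 ≤ p.1) : pvStepA l p = l := by
  have h0 : p.1 ≠ 0 := by omega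
  have h1 : p.1 ≠ 1 := by omega
  have h2 : p.1 ≠ 2 := by omega
  have h3 : p.1 ≠ 3 := by omega
  simp [pvStepA, h0, h1, h2, h3]

theorem pvFold_high (rest : List Int) (s : Int) (l : List Int) (hs : 4 ≤ s) :
    (PySem.List.enumerate rest s).foldl pvStepA l = l := by
  induction rest generalizing s l with
  | nil => rfl
  | cons x xs ih =>
    rw [PySem.List.enumerate_cons, List.foldl_cons, pvStepA_high l (s, x) hs]
    exact ih (s + 1) l (by omega)

-- ===== VERDICT =====
theorem dinner_convert_spec : Claim_equal_dinner_convert := by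
  intro l _
  unfold Spec_dinner_convert dinner_convert dinner_convert_alt
  rcases l with _ | ⟨a, _ | ⟨b, _ | ⟨c, _ | ⟨d, rest⟩⟩⟩⟩
  · decide
  · simp only [PySem.List.enumerate_cons, PySem.List.enumerate_nil, List.foldl_cons,
      List.foldl_nil, pvStep0]
    simp
  · simp only [PySem.List.enumerate_cons, PySem.List.enumerate_nil, List.foldl_cons,
      List.foldl_nil]
    norm_num
    rw [pvStep0, pvStep1]
  · simp only [PySem.List.enumerate_cons, PySem.List.enumerate_nil, List.foldl_cons,
      List.foldl_nil]
    norm_num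
    rw [pvStep0, pvStep1, pvStep2]
  · simp only [PySem.List.enumerate_cons, List.foldl_cons]
    norm_num
    rw [pvStep0, pvStep1, pvStep2, pvStep3, pvFold_high rest 4 _ (by omega)]
    simp
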